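-- pv_equiv track=rewrite | github.com/mouseratti/katas | kata1/kata.py | make_kata
-- ===== SOURCE A (Python) =====
-- def make_kata(inputted):
--     """Test finished in 2.796117067337036 seconds"""
--     inputted = inputted.lower()
--     inputted_list = list(inputted)
--     def gen(li):
--         nonuniq = []
--         while li:
--             symbol = li.pop(0)
--             if symbol in nonuniq:
--                 out = ')'
--             elif symbol in li:
--                 out = ')'
--                 nonuniq.append(symbol)
--             else:
--                 out = '('
--             yield out
--     return ''.join(_ for _ in gen(inputted_list))
-- ===== SOURCE B (Python) =====
-- def make_kata(inputted):
--     s = inputted.lower()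
--     counts = {}
--     for ch in s:
--         counts[ch] = counts.get(ch, 0) + 1
--     return ''.join(')' if counts[ch] > 1 else '(' for ch in s)
-- ===== Notes on version B (the rewrite author's own statement) =====
-- stated objective: faster
-- what changed: Replaced the destructive while/pop(0) generator with interleaved membership scans by two clean passes: one pass builds a character-count dict over the lowercased input, a second pass maps each character to the duplicate or unique paren by its count.
import Mathlib
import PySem

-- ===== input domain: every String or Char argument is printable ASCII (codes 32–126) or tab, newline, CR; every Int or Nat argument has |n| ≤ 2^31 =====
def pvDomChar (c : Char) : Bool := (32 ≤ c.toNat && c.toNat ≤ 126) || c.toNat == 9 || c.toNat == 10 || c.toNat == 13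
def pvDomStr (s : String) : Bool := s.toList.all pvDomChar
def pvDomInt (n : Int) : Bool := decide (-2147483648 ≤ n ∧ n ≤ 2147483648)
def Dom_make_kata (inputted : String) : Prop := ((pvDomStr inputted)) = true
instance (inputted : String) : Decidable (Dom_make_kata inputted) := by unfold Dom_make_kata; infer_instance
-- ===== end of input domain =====

-- B replaces A's quadratic destructive pop(0)/membership-scan loop by two passes: build a count dict, then map each char by its count (faster: O(n^2) → O(n)).

-- ===== PORT A =====
-- A's generator loop: pop the head, check the seen-duplicates list, then the remaining list.
def makeKataGen (nonuniq : List Char) : List Char → List Char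
  | [] => []
  | c :: li =>
    if c ∈ nonuniq then ')' :: makeKataGen nonuniq li
    else if c ∈ li then ')' :: makeKataGen (nonuniq ++ [c]) li
    else '(' :: makeKataGen nonuniq li

def make_kata (inputted : String) : String :=
  String.mk (makeKataGen [] (PySem.Str.lower inputted).toList)

-- ===== PORT B =====
def make_kata_alt (inputted : String) : String :=
  let s := (PySem.Str.lower inputted).toList
  let counts := s.foldl (fun d x => d.insert x (d.getD x 0 + 1)) (PySem.Dict.empty : PySem.Dict Char Int)
  String.mk (s.map (fun c => if counts.getD c 0 > 1 then ')' else '('))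

-- ===== PRECONDITION & SPEC =====
def Spec_make_kata (inputted : String) (out : String) : Prop := out = make_kata_alt inputted
instance (inputted : String) (out : String) : Decidable (Spec_make_kata inputted out) := by unfold Spec_make_kata; infer_instance

-- ===== CLAIM (what is proved, stated in full; the proofs are below) =====
def Claim_equal_make_kata : Prop := ∀ (inputted : String), Dom_make_kata inputted → Spec_make_kata inputted (make_kata inputted)

-- ===== LEMMAS AND PROOFS =====

-- Invariant: nonuniq holds exactly the already-processed characters that occur at least twice overall.
lemma makeKataGen_eq_map (li : List Char) :
    ∀ (done nonuniq : List Char),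
      (∀ c, c ∈ nonuniq ↔ (c ∈ done ∧ 1 < (done ++ li).count c)) →
      makeKataGen nonuniq li = li.map (fun c => if 1 < (done ++ li).count c then ')' else '(') := by
  induction li with
  | nil => intro done nonuniq _; simp [makeKataGen]
  | cons c li ih =>
    intro done nonuniq h
    have hassoc : (done ++ [c]) ++ li = done ++ c :: li := by simp
    by_cases hc : c ∈ nonuniq
    · have hcd := (h c).mp hc
      simp only [makeKataGen, if_pos hc, List.map_cons, if_pos hcd.2]
      congr 1
      have := ih (done ++ [c]) nonuniq (fun d => by
        rw [hassoc]
        by_cases hdc : d = c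
        · subst hdc
          constructor
          · intro _; exact ⟨by simp, hcd.2⟩
          · intro _; exact hc
        · rw [h d]
          simp [List.mem_append, hdc])
      rw [hassoc] at this; exact this
    · by_cases hcl : c ∈ li
      · have hcnt : 1 < (done ++ c :: li).count c := by
          have h1 : 1 ≤ li.count c := List.count_pos_iff.mpr hcl
          have : (c :: li).count c = li.count c + 1 := by simp
          calc 1 < li.count c + 1 := by omega
            _ = (c :: li).count c := this.symm
            _ ≤ (done ++ c :: li).count c := by simp [List.count_append]
        simp only [makeKataGen, if_neg hc, if_pos hcl, List.map_cons, if_pos hcnt]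
        congr 1
        have := ih (done ++ [c]) (nonuniq ++ [c]) (fun d => by
          rw [hassoc]
          by_cases hdc : d = c
          · subst hdc
            simp only [List.mem_append, List.mem_singleton]
            exact ⟨fun _ => ⟨by simp, hcnt⟩, fun _ => by simp⟩
          · simp only [List.mem_append, List.mem_singleton, hdc, or_false]
            rw [h d])
        rw [hassoc] at this; exact this
      · have hcd : c ∉ done := by
          intro hmem
          apply hc
          refine (h c).mpr ⟨hmem, ?_⟩
          have h1 : 1 ≤ done.count c := List.count_pos_iff.mpr hmem
          simp [List.count_append]
          omega
        have hcnt : (done ++ c :: li).count c = 1 := by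
          simp [List.count_append, List.count_eq_zero_of_not_mem hcd,
                List.count_eq_zero_of_not_mem hcl]
        simp only [makeKataGen, if_neg hc, if_neg hcl, List.map_cons, hcnt,
          if_neg (by omega : ¬ (1:Nat) < 1)]
        congr 1
        have := ih (done ++ [c]) nonuniq (fun d => by
          rw [hassoc]
          by_cases hdc : d = c
          · subst hdc
            constructor
            · intro hd; exact absurd hd hc
            · rintro ⟨_, hlt⟩; omega
          · rw [h d]
            simp [List.mem_append, hdc])
        rw [hassoc] at this; exact this

-- ===== VERDICT (by name: the statement is the Claim_ definition above) =====
theorem make_kata_spec : Claim_equal_make_kata := by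
  intro inputted _
  unfold Spec_make_kata make_kata make_kata_alt
  simp only []
  rw [makeKataGen_eq_map _ [] [] (fun c => by simp), List.nil_append]
  congr 1
  apply List.map_congr_left
  intro c _
  rw [PySem.Dict.foldl_insert_getD_add_one_eq_counter, PySem.Dict.getD_counter]
  by_cases h1 : 1 < ((PySem.Str.lower inputted).toList).count c
  · rw [if_pos h1,
      if_pos (show ((((PySem.Str.lower inputted).toList).count c : Int)) > 1 by exact_mod_cast h1)]
  · rw [if_neg h1,
      if_neg (show ¬ ((((PySem.Str.lower inputted).toList).count c : Int)) > 1 by exact_mod_cast h1)]
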